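-- pv_equiv track=rewrite | github.com/amar2468/Python | Class Projects and My Own Projects/DocumentRetrieval.py | divide_into_documents
-- ===== SOURCE A (Python) =====
-- import string
--
-- def divide_into_documents(my_file): # This function takes the file as the parameter and divides the documents in the file into the list
--
--     current_document = '' # I started off with an empty string so that I can concatenate each line into it from the document until the token
--     list1 = [] # empty list that will hold all the documents
--     new_token = '<NEW DOCUMENT>' # string2 has been set to that value so that when I approach the token, I can skip to the next line
--
--     for i in my_file: # iterates over the file using i
--         if new_token not in i:
--             current_document = current_document + i
--             pass
--         else: # if we encounter the token
--             if current_document == '': # if the string is empty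
--                 pass
--             else: # in the case that there are elements in the string i.e. it is filled with elements
--                 for i in current_document: # for each element in the string
--                     if i in string.punctuation and i != '.': # if that element is a member of string.punctuation
--                         current_document = current_document.replace(i, '') # replace it with ''
--                 list1.append(current_document) # this adds the string to the list
--                 current_document = '' # once you add the string to the list, you empty the string so that you can continue on
--             pass
--     # This last for loop is there because after the last <NEW DOCUMENT>, there is no more <NEW DOCUMENT> and it is not added to the list
--     # With this, I simply append the string to the list when the document is finished.
--
--     for i in current_document: # this is similar to the one above in the else statement. The reason why we have one here is because the last document needs to be added to the list and we are already outside the loop because there is no more token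
--         if i in string.punctuation and i != '.': # if i is a member of string.punctuation
--             current_document = current_document.replace(i, '') # replace it with ''
--     list1.append(current_document) # append the string to the list
--
--     return list1 # return the list
-- ===== SOURCE B (Python) =====
-- import string
--
-- def divide_into_documents(my_file):
--     # Pass 1: group lines into documents at '<NEW DOCUMENT>' marker lines.
--     docs = []
--     current = ''
--     for line in my_file:
--         if '<NEW DOCUMENT>' in line:
--             if current != '':
--                 docs.append(current)
--             current = ''
--         else:
--             current = current + line
--     docs.append(current)
--     # Pass 2: strip punctuation (except '.') from each document in one filter.
--     return [''.join(ch for ch in d if ch == '.' or ch not in string.punctuation)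
--             for d in docs]
-- ===== Notes on version B (the rewrite author's own statement) =====
-- stated objective: simpler
-- what changed: Replaces the single interleaved loop (which cleans each document at flush time by repeated full-string str.replace scans, one per punctuation character) with two passes: a grouping pass collecting raw documents, then a cleaning pass removing punctuation-except-period from each document with one linear filter.
import Mathlib
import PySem

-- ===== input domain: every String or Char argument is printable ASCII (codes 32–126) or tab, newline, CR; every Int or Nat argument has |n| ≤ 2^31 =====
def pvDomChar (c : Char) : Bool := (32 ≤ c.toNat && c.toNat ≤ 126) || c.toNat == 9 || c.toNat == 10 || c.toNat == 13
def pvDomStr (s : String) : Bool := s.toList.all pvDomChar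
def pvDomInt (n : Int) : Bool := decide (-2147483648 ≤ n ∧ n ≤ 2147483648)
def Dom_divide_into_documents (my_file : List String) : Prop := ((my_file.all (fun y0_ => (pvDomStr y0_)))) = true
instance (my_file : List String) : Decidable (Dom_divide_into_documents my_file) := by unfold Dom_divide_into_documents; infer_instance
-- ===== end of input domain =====

-- B replaces A's single interleaved loop (clean-at-flush via repeated str.replace scans)
-- with a grouping pass plus a separate one-filter cleaning pass; objective: simpler.


-- ===== PORT A =====
-- string.punctuation
def pvPunct : List Char := "!\"#$%&'()*+,-./:;<=>?@[\\]^_`{|}~".toList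

-- A's flush-time cleaning: iterate over the (snapshot of the) current document,
-- and for each punctuation char ≠ '.' remove ALL its occurrences via str.replace.
def pvCleanA (cs : List Char) : List Char :=
  cs.foldl (fun cur c =>
    if pvPunct.contains c && c != '.' then PySem.Chars.replace cur [c] [] else cur) cs

def divide_into_documents (my_file : List String) : List String :=
  let fin := my_file.foldl (fun (st : List Char × List (List Char)) line =>
    if PySem.Chars.isIn "<NEW DOCUMENT>".toList line.toList = false then
      (st.1 ++ line.toList, st.2)
    else if st.1 = [] then st
    else ([], st.2 ++ [pvCleanA st.1])) ([], [])
  (fin.2 ++ [pvCleanA fin.1]).map String.ofList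

-- ===== PORT B =====
-- B's cleaning: one filter keeping '.' and non-punctuation characters.
def pvCleanB (cs : List Char) : List Char :=
  cs.filter (fun c => c == '.' || !pvPunct.contains c)

def divide_into_documents_alt (my_file : List String) : List String :=
  let g := my_file.foldl (fun (st : List Char × List (List Char)) line =>
    if PySem.Chars.isIn "<NEW DOCUMENT>".toList line.toList then
      (([] : List Char), if st.1 = [] then st.2 else st.2 ++ [st.1])
    else (st.1 ++ line.toList, st.2)) ([], [])
  (g.2 ++ [g.1]).map (fun d => String.ofList (pvCleanB d))

-- ===== PRECONDITION & SPEC =====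
def Spec_divide_into_documents (my_file : List String) (out : List String) : Prop := out = divide_into_documents_alt my_file
instance (my_file : List String) (out : List String) : Decidable (Spec_divide_into_documents my_file out) := by unfold Spec_divide_into_documents; infer_instance

-- ===== CLAIM (what is proved, stated in full; the proofs are below) =====
def Claim_equal_divide_into_documents : Prop := ∀ (my_file : List String), Dom_divide_into_documents my_file → Spec_divide_into_documents my_file (divide_into_documents my_file)

-- ===== LEMMAS AND PROOFS =====

-- replace.go with old = [c], new = []: deletes every occurrence of c (with enough fuel).
theorem pv_replace_go_single (c : Char) : ∀ (fuel : Nat) (l acc : List Char),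
    l.length ≤ fuel →
    PySem.Chars.replace.go [c] [] fuel l acc = acc.reverse ++ l.filter (· != c) := by
  intro fuel
  induction fuel with
  | zero =>
    intro l acc h
    have : l = [] := List.eq_nil_of_length_eq_zero (Nat.le_zero.mp h)
    subst this
    simp [PySem.Chars.replace.go]
  | succ n ih =>
    intro l acc h
    cases l with
    | nil => simp [PySem.Chars.replace.go]
    | cons d t =>
      by_cases hdc : c = d
      · subst hdc
        simp only [PySem.Chars.replace.go, List.isPrefixOf, BEq.rfl, Bool.and_true]
        rw [if_pos trivial]
        rw [show PySem.Chars.replace.go [c] [] n (List.drop [c].length (c :: t)) ([].reverse ++ acc)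
              = PySem.Chars.replace.go [c] [] n t acc from rfl]
        rw [ih t acc (by simpa using Nat.le_of_succ_le_succ h)]
        simp
      · have hbe : (c == d) = false := by simpa using hdc
        simp only [PySem.Chars.replace.go, List.isPrefixOf, hbe, Bool.false_and]
        rw [if_neg (by simp)]
        rw [ih t (d :: acc) (by simpa using Nat.le_of_succ_le_succ h)]
        have hne : (d != c) = true := by simpa using (Ne.symm hdc)
        simp [hne]

-- s.replace(c, '') for a single char is a filter.
theorem pv_replace_single (s : List Char) (c : Char) :
    PySem.Chars.replace s [c] [] = s.filter (· != c) := by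
  rw [PySem.Chars.replace]
  rw [if_neg (by simp)]
  rw [pv_replace_go_single c s.length s [] (le_refl _)]
  simp

-- Folding "remove all occurrences of c when P c" over l, starting from s,
-- filters out exactly the characters of l satisfying P.
theorem pv_foldl_removeAll (P : Char → Bool) : ∀ (l s : List Char),
    l.foldl (fun cur c => if P c then cur.filter (· != c) else cur) s
      = s.filter (fun d => !(P d && l.contains d)) := by
  intro l
  induction l with
  | nil => intro s; simp
  | cons c l ih =>
    intro s
    simp only [List.foldl_cons]
    by_cases hc : P c = true
    · rw [if_pos hc, ih, List.filter_filter]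
      apply List.filter_congr
      intro d _
      by_cases hdc : d = c
      · subst hdc; simp [hc]
      · simp [hdc]
    · rw [if_neg hc, ih]
      apply List.filter_congr
      intro d _
      by_cases hdc : d = c
      · subst hdc
        simp [Bool.eq_false_iff.mpr hc]
      · simp [hdc]

-- A's flush-time cleaning equals B's one-pass filter.
theorem pv_cleanA_eq_cleanB (cs : List Char) : pvCleanA cs = pvCleanB cs := by
  unfold pvCleanA pvCleanB
  have hfun : (fun cur c =>
      if pvPunct.contains c && c != '.' then PySem.Chars.replace cur [c] [] else cur)
      = (fun (cur : List Char) c =>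
      if pvPunct.contains c && c != '.' then cur.filter (· != c) else cur) := by
    funext cur c
    by_cases h : (pvPunct.contains c && c != '.') = true
    · rw [if_pos h, if_pos h, pv_replace_single]
    · rw [if_neg h, if_neg h]
  rw [hfun, pv_foldl_removeAll (fun c => pvPunct.contains c && c != '.')]
  apply List.filter_congr
  intro d hd
  have hcont : cs.contains d = true := List.elem_eq_true_of_mem hd
  rw [hcont]
  by_cases hp : d ∈ pvPunct <;> by_cases hdot : d = '.' <;>
    simp [hp, hdot, bne]

-- The two folds stay in lockstep: A's accumulator is B's with every entry cleaned.
theorem pv_loop_rel : ∀ (lines : List String) (cur : List Char) (docs : List (List Char)),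
    lines.foldl (fun (st : List Char × List (List Char)) line =>
        if PySem.Chars.isIn "<NEW DOCUMENT>".toList line.toList = false then
          (st.1 ++ line.toList, st.2)
        else if st.1 = [] then st
        else ([], st.2 ++ [pvCleanA st.1])) (cur, docs.map pvCleanB)
      = ((lines.foldl (fun (st : List Char × List (List Char)) line =>
            if PySem.Chars.isIn "<NEW DOCUMENT>".toList line.toList then
              (([] : List Char), if st.1 = [] then st.2 else st.2 ++ [st.1])
            else (st.1 ++ line.toList, st.2)) (cur, docs)).1,
         ((lines.foldl (fun (st : List Char × List (List Char)) line =>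
            if PySem.Chars.isIn "<NEW DOCUMENT>".toList line.toList then
              (([] : List Char), if st.1 = [] then st.2 else st.2 ++ [st.1])
            else (st.1 ++ line.toList, st.2)) (cur, docs)).2).map pvCleanB) := by
  intro lines
  induction lines with
  | nil => intro cur docs; simp
  | cons line rest ih =>
    intro cur docs
    simp only [List.foldl_cons]
    by_cases htok : PySem.Chars.isIn "<NEW DOCUMENT>".toList line.toList = true
    · rw [if_neg (by simp only [htok]; decide), if_pos htok]
      by_cases hcur : cur = []
      · subst hcur
        rw [if_pos rfl, if_pos rfl]
        exact ih [] docs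
      · rw [if_neg hcur, if_neg hcur]
        have hmap : docs.map pvCleanB ++ [pvCleanA cur] = (docs ++ [cur]).map pvCleanB := by
          simp [pv_cleanA_eq_cleanB]
        rw [hmap]
        exact ih [] (docs ++ [cur])
    · have hf : PySem.Chars.isIn "<NEW DOCUMENT>".toList line.toList = false :=
        Bool.eq_false_iff.mpr htok
      rw [if_pos hf, if_neg htok]
      exact ih (cur ++ line.toList) docs

-- ===== VERDICT (by name: the statement is the Claim_ definition above) =====
theorem divide_into_documents_spec : Claim_equal_divide_into_documents := by
  intro my_file _
  unfold Spec_divide_into_documents divide_into_documents divide_into_documents_alt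
  have h := pv_loop_rel my_file [] []
  simp only [List.map_nil] at h
  rw [h]
  simp [pv_cleanA_eq_cleanB]
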